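-- pv_equiv track=rewrite | github.com/rexarski/biji-ben | uoft/CSC148H1F Intro to Comp Sci/@week11_fun_sorts/timsort.py | find_runs
-- ===== SOURCE A (Python) =====
-- def find_runs(lst):
--     """ (list) -> list of (int, int)
--     Precondition: lst is non-empty
--     Return a list of tuples indexing the runs of lst.
--
--     >>> find_runs([1, 4, 7, 10, 2, 5, 3, -1])
--     [(0, 4), (4, 6), (6, 7), (7, 8)]
--     >>> find_runs([0, 1, 2, 3, 4, 5])
--     [(0, 6)]
--     >>> find_runs([10, 4, -2, 1])
--     [(0, 1), (1, 2), (2, 4)]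
--     """
--     runs = []
--
--     # Variables to keep track of the start and end points
--     # of a run
--     run_start = 0
--     run_end = 1
--     while run_start < len(lst):
--         # How can you tell if a run should continue?
--         i = run_start
--         if run_end >= len(lst):
--             runs.append((run_start, run_end))
--             break
--         while lst[run_end] >= lst[i]:
--             run_end += 1
--             i += 1
--             if run_end >= len(lst):
--                 break
--         # How can you tell if a run is over?
--         runs.append((run_start, run_end))
--         run_start = run_end
--         run_end += 1
--
--     return runs
-- ===== SOURCE B (Python) =====
-- def find_runs(lst):
--     # Boundary-table decomposition: collect all run boundaries in one pass,
--     # then pair adjacent boundaries.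
--     if not lst:
--         return []
--     boundaries = [0] + [i for i in range(1, len(lst)) if lst[i] < lst[i - 1]] + [len(lst)]
--     return list(zip(boundaries, boundaries[1:]))
-- ===== Notes on version B (the rewrite author's own statement) =====
-- stated objective: alternative
-- what changed: Replaced A's nested while-loops with dual cursors by a boundary-table decomposition: one comprehension collects all descent indices as boundaries, then adjacent boundaries are paired with zip.
import Mathlib
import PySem

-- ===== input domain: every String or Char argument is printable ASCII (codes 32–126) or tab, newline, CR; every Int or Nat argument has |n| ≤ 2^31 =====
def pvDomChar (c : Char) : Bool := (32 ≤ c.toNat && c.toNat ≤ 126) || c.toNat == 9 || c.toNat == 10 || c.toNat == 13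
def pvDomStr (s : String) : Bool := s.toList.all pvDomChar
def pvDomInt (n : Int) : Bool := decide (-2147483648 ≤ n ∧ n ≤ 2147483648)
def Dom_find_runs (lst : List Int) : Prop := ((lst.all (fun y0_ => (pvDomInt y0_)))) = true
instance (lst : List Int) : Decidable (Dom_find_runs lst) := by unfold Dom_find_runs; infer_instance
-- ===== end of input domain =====

-- B replaces A's nested while-loops by a boundary table paired with zip; alternative decomposition, same cost.

-- ===== PORT A =====
-- inner while loop: 'while lst[run_end] >= lst[i]: run_end += 1; i += 1; if run_end >= len(lst): break'
-- (indices are nonnegative and in range at every read, so List.getD is exact here)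
def innerA (lst : List Int) (re i : Nat) : Nat :=
  if lst.getD re 0 ≥ lst.getD i 0 then
    (if lst.length ≤ re + 1 then re + 1 else innerA lst (re + 1) (i + 1))
  else re
termination_by lst.length - re
decreasing_by omega

-- outer while loop, state (run_start, run_end); fuel only makes the recursion structural
def outerA (lst : List Int) (rs re fuel : Nat) : List (Int × Int) :=
  match fuel with
  | 0 => []
  | fuel + 1 =>
    if rs < lst.length then
      if lst.length ≤ re then [((rs : Int), (re : Int))]
      else
        let e := innerA lst re rs
        ((rs : Int), (e : Int)) :: outerA lst e (e + 1) fuel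
    else []

def find_runs (lst : List Int) : List (Int × Int) :=
  outerA lst 0 1 (lst.length + 1)

-- ===== PORT B =====
-- 'lst[i] < lst[i-1]' for the int i drawn from range(1, len(lst))
def descAt (lst : List Int) (i : Int) : Bool :=
  PySem.List.pyGetD lst i 0 < PySem.List.pyGetD lst (i - 1) 0

def find_runs_alt (lst : List Int) : List (Int × Int) :=
  if lst.isEmpty then []
  else
    let boundaries : List Int :=
      (0 :: (PySem.List.pyRange 1 (lst.length : Int) 1).filter (descAt lst)) ++ [(lst.length : Int)]
    boundaries.zip (boundaries.drop 1)

-- ===== PRECONDITION & SPEC =====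
def Spec_find_runs (lst : List Int) (out : List (Int × Int)) : Prop := out = find_runs_alt lst
instance (lst : List Int) (out : List (Int × Int)) : Decidable (Spec_find_runs lst out) := by unfold Spec_find_runs; infer_instance

-- ===== CLAIM (what is proved, stated in full; the proofs are below) =====
def Claim_equal_find_runs : Prop := ∀ (lst : List Int), Dom_find_runs lst → Spec_find_runs lst (find_runs lst)

-- ===== LEMMAS AND PROOFS =====

-- the descent-boundary filter from index s on
def Fb (lst : List Int) (s : Nat) : List Int :=
  (PySem.List.pyRange (s : Int) (lst.length : Int) 1).filter (descAt lst)

theorem Fb_len (lst : List Int) : Fb lst lst.length = [] := by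
  simp [Fb, PySem.List.pyRange_one_eq_nil le_rfl]

theorem descAt_nat (lst : List Int) (re : Nat) (h1 : 0 < re) :
    descAt lst (re : Int) = decide (lst.getD re 0 < lst.getD (re - 1) 0) := by
  have hc : (re : Int) - 1 = ((re - 1 : Nat) : Int) := by omega
  simp [descAt, hc]

theorem Fb_cons_skip (lst : List Int) (re : Nat) (h1 : 0 < re) (h2 : re < lst.length)
    (hge : lst.getD (re - 1) 0 ≤ lst.getD re 0) : Fb lst re = Fb lst (re + 1) := by
  unfold Fb
  rw [PySem.List.pyRange_one_cons (by exact_mod_cast h2)]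
  have hd : descAt lst (re : Int) = false := by
    rw [descAt_nat lst re h1]
    simp only [decide_eq_false_iff_not, not_lt]
    exact hge
  have hc : (re : Int) + 1 = ((re + 1 : Nat) : Int) := by omega
  rw [List.filter_cons, hd, hc]
  simp

theorem Fb_cons_of_desc (lst : List Int) (e : Nat) (h2 : e < lst.length)
    (hd : descAt lst (e : Int) = true) : Fb lst e = (e : Int) :: Fb lst (e + 1) := by
  unfold Fb
  rw [PySem.List.pyRange_one_cons (by exact_mod_cast h2)]
  have hc : (e : Int) + 1 = ((e + 1 : Nat) : Int) := by omega
  rw [List.filter_cons, hd, hc]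
  simp

-- characterization of the inner loop: it reaches the next boundary and the filter is unchanged
theorem innerA_spec (lst : List Int) (re : Nat) (h1 : 0 < re) (h2 : re < lst.length) :
    re ≤ innerA lst re (re - 1) ∧ innerA lst re (re - 1) ≤ lst.length ∧
    Fb lst re = Fb lst (innerA lst re (re - 1)) ∧
    (innerA lst re (re - 1) = lst.length ∨
      (innerA lst re (re - 1) < lst.length ∧ descAt lst (innerA lst re (re - 1)) = true)) := by
  have key : ∀ k re, lst.length - re ≤ k → 0 < re → re < lst.length →
      re ≤ innerA lst re (re - 1) ∧ innerA lst re (re - 1) ≤ lst.length ∧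
      Fb lst re = Fb lst (innerA lst re (re - 1)) ∧
      (innerA lst re (re - 1) = lst.length ∨
        (innerA lst re (re - 1) < lst.length ∧ descAt lst (innerA lst re (re - 1)) = true)) := by
    intro k
    induction k with
    | zero => intro re hk h1 h2; omega
    | succ k ih =>
      intro re hk h1 h2
      rw [innerA]
      split_ifs with hge hlen
      · refine ⟨by omega, by omega, ?_, Or.inl (by omega)⟩
        have := Fb_cons_skip lst re h1 h2 hge
        have he : re + 1 = lst.length := by omega
        rw [this, he]
      · have hr : re - 1 + 1 = re := by omega
        rw [hr]
        have ihs := ih (re + 1) (by omega) (by omega) (by omega)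
        have hr2 : re + 1 - 1 = re := by omega
        rw [hr2] at ihs
        exact ⟨by omega, ihs.2.1, (Fb_cons_skip lst re h1 h2 hge).trans ihs.2.2.1,
          ihs.2.2.2⟩
      · refine ⟨le_rfl, le_of_lt h2, rfl, Or.inr ⟨h2, ?_⟩⟩
        rw [descAt_nat lst re h1]
        simp only [decide_eq_true_eq]
        exact lt_of_not_ge hge
  exact key (lst.length - re) re le_rfl h1 h2

theorem outerA_spec (lst : List Int) (fuel s : Nat) (hs : s < lst.length)
    (hf : lst.length - s ≤ fuel) :
    outerA lst s (s + 1) fuel =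
      (((s : Int) :: Fb lst (s + 1)) ++ [(lst.length : Int)]).zip
        ((Fb lst (s + 1)) ++ [(lst.length : Int)]) := by
  induction fuel generalizing s with
  | zero => omega
  | succ fuel ih =>
    rw [outerA]
    rw [if_pos hs]
    by_cases hl : lst.length ≤ s + 1
    · rw [if_pos hl]
      have he : s + 1 = lst.length := by omega
      rw [he, Fb_len]
      simp
    · rw [if_neg hl]
      have hspec := innerA_spec lst (s + 1) (by omega) (by omega)
      have hr : s + 1 - 1 = s := by omega
      rw [hr] at hspec
      obtain ⟨hle, hub, hFb, hbd⟩ := hspec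
      show ((s : Int), ((innerA lst (s + 1) s : Nat) : Int)) ::
          outerA lst (innerA lst (s + 1) s) (innerA lst (s + 1) s + 1) fuel = _
      rcases hbd with hn | ⟨hlt, hd⟩
      · have hstop : outerA lst (innerA lst (s + 1) s) (innerA lst (s + 1) s + 1) fuel = [] := by
          cases fuel with
          | zero => rfl
          | succ f => rw [outerA, if_neg (by omega)]
        rw [hstop, hFb, hn, Fb_len]
        simp
      · rw [hFb, Fb_cons_of_desc lst _ hlt hd, ih _ hlt (by omega)]
        simp [List.zip_cons_cons]

-- ===== VERDICT (by name: the statement is the Claim_ definition above) =====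
theorem find_runs_spec : Claim_equal_find_runs := by
  intro lst _
  unfold Spec_find_runs
  by_cases hne : lst.isEmpty
  · have hnil : lst = [] := by simpa using hne
    subst hnil; rfl
  · unfold find_runs find_runs_alt
    rw [if_neg hne]
    have hn : lst ≠ [] := by simpa using hne
    have h0 : 0 < lst.length := List.length_pos_iff.mpr hn
    rw [outerA_spec lst (lst.length + 1) 0 h0 (by omega)]
    simp [Fb]
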